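-- pv_equiv track=rewrite | github.com/1352215052/MHIT | 5.immune_noecho_bar.py | state_accout
-- ===== SOURCE A (Python) =====
-- def state_accout(seed_list_convert):
-- 	s_list=[] #每个时步统计一次（更新一次），所以每次s_list都会被重置（即重新变为空集）
-- 	i_list=[]
-- 	e_list=[]
-- 	#对seed_list中的节点进行归类（传播者、无知者、免疫者）
-- 	for  value in seed_list_convert:
-- 		if value<0:
-- 			s_list.append(value)
-- 		elif value>=0 and value<4:
-- 			i_list.append(value)
-- 		else:
-- 			e_list.append(value)
--
-- 	seed_list_find=[s_list,i_list,e_list]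
--
-- 	return seed_list_find
-- ===== SOURCE B (Python) =====
-- def state_accout(seed_list_convert):
--     # Three independent filter passes instead of one dispatching loop.
--     s_list = [v for v in seed_list_convert if v < 0]
--     i_list = [v for v in seed_list_convert if 0 <= v < 4]
--     e_list = [v for v in seed_list_convert if v >= 4]
--     return [s_list, i_list, e_list]
-- ===== Notes on version B (the rewrite author's own statement) =====
-- stated objective: idiomatic
-- what changed: Replaces the single branching loop that appends into three accumulators with three independent filter comprehensions, one per category.
import Mathlib
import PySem

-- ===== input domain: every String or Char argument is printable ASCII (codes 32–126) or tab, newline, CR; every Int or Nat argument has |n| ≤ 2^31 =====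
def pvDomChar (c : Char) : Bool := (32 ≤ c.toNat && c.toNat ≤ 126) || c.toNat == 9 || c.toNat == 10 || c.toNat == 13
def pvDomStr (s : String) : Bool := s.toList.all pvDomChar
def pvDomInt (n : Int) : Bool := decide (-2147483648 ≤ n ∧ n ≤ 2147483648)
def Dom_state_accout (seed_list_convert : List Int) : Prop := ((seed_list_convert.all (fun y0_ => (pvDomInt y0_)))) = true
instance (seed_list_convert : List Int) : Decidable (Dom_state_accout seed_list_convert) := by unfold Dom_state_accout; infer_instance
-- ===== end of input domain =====

-- ===== PORT A =====
-- literal port of A: one pass, foldl holding the three accumulators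
def state_accout (seed_list_convert : List Int) : List (List Int) :=
  let st := seed_list_convert.foldl
    (fun (acc : List Int × List Int × List Int) value =>
      if value < 0 then (acc.1 ++ [value], acc.2.1, acc.2.2)
      else if value ≥ 0 ∧ value < 4 then (acc.1, acc.2.1 ++ [value], acc.2.2)
      else (acc.1, acc.2.1, acc.2.2 ++ [value]))
    ([], [], [])
  [st.1, st.2.1, st.2.2]

-- ===== PORT B =====
-- port of B: three independent filter passes
def state_accout_alt (seed_list_convert : List Int) : List (List Int) :=
  [seed_list_convert.filter (fun v => v < 0),
   seed_list_convert.filter (fun v => 0 ≤ v ∧ v < 4),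
   seed_list_convert.filter (fun v => v ≥ 4)]

-- ===== PRECONDITION & SPEC =====
def Spec_state_accout (seed_list_convert : List Int) (out : List (List Int)) : Prop := out = state_accout_alt seed_list_convert
instance (seed_list_convert : List Int) (out : List (List Int)) : Decidable (Spec_state_accout seed_list_convert out) := by unfold Spec_state_accout; infer_instance

-- ===== CLAIM (what is proved, stated in full; the proofs are below) =====
def Claim_equal_state_accout : Prop := ∀ (seed_list_convert : List Int), Dom_state_accout seed_list_convert → Spec_state_accout seed_list_convert (state_accout seed_list_convert)

-- ===== LEMMAS AND PROOFS =====

-- ===== VERDICT (by name: the statement is the Claim_ definition above) =====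
theorem pv_fold_inv (l : List Int) (s i e : List Int) :
    l.foldl
      (fun (acc : List Int × List Int × List Int) value =>
        if value < 0 then (acc.1 ++ [value], acc.2.1, acc.2.2)
        else if value ≥ 0 ∧ value < 4 then (acc.1, acc.2.1 ++ [value], acc.2.2)
        else (acc.1, acc.2.1, acc.2.2 ++ [value]))
      (s, i, e)
    = (s ++ l.filter (fun v => v < 0),
       i ++ l.filter (fun v => 0 ≤ v ∧ v < 4),
       e ++ l.filter (fun v => v ≥ 4)) := by
  induction l generalizing s i e with
  | nil => simp
  | cons x xs ih =>
    simp only [List.foldl_cons, List.filter_cons]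
    by_cases h1 : x < 0
    · have h2 : ¬ (0 ≤ x ∧ x < 4) := by omega
      have h3 : ¬ x ≥ 4 := by omega
      simp [h1, h2, h3, ih]
    · by_cases h2 : x ≥ 0 ∧ x < 4
      · have h3 : ¬ x ≥ 4 := by omega
        simp [h1, h2, h3, ih]
      · have h3 : x ≥ 4 := by omega
        simp [h1, h2, h3, ih]

theorem state_accout_spec : Claim_equal_state_accout := by
  intro l _
  unfold Spec_state_accout state_accout state_accout_alt
  simp [pv_fold_inv]
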